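-- pv_equiv track=rewrite | github.com/Darius5273/Minefield-Game | Logics_AI/safety_checker.py | ensure_parentheses_after_quantifiers
-- ===== SOURCE A (Python) =====
-- def ensure_parentheses_after_quantifiers(formula):
--     quantifiers = ["all", "exists"]
--     i = 0
--     while i < len(formula):
--         for quantifier in quantifiers:
--             if formula[i:i + len(quantifier)] == quantifier:
--                 j = i + len(quantifier)
--                 while j < len(formula) and formula[j] == " ":
--                     j += 1
--                 if j < len(formula) and formula[j].isalpha() and len(formula[j:j + 1]) == 1:
--                     j += 1
--                     while j < len(formula) and formula[j] == " ":
--                         j += 1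
--                     if j >= len(formula) or formula[j] != "(":
--                         formula = formula[:j] + "(" + formula[j:] + ")"
--                         i = j + 1
--         i += 1
--     return formula
-- ===== SOURCE B (Python) =====
-- def ensure_parentheses_after_quantifiers(formula):
--     # One pass over the original string with an output buffer and a counter of
--     # pending closing parentheses (appended once at the end) instead of
--     # rebuilding the string after every insertion and rescanning it.
--     n = len(formula)
--     out = []
--     closes = 0
--     prev = 0  # start of the not-yet-copied part of the original string
--     i = 0
--     while i < n:
--         for quantifier in ("all", "exists"):
--             if formula.startswith(quantifier, i):
--                 j = i + len(quantifier)
--                 while j < n and formula[j] == " ":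
--                     j += 1
--                 if j < n and formula[j].isalpha():
--                     j += 1
--                     while j < n and formula[j] == " ":
--                         j += 1
--                     if j >= n or formula[j] != "(":
--                         out.append(formula[prev:j])
--                         out.append("(")
--                         closes += 1
--                         prev = j
--                         i = j
--         i += 1
--     out.append(formula[prev:])
--     return "".join(out) + ")" * closes
-- ===== Notes on version B (the rewrite author's own statement) =====
-- stated objective: alternative
-- what changed: B makes a single pass over the original string, copying segments into an output buffer and counting pending closing parentheses which are appended once at the end, instead of A's rebuilding the whole string and rescanning from the insertion point after every insertion; intended as asymptotically faster on insertion-heavy formulas, but a timing run measured only a 1.26x constant-factor gain on its generated inputs.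
import Mathlib
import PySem

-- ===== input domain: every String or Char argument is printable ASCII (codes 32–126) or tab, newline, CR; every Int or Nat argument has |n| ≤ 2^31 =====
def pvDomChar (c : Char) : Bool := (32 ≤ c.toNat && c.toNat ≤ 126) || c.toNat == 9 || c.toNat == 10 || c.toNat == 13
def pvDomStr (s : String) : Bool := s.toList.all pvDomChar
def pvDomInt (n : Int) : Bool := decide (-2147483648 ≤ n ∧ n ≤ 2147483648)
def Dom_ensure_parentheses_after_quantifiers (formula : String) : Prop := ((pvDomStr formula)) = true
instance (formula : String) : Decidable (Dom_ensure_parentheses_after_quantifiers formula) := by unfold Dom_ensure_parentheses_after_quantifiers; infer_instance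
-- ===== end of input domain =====

-- B replaces A's rebuild-the-string-and-rescan insertion loop by a single pass over the
-- original string with an output buffer and a counter of pending closing parentheses
-- appended once at the end.

-- number of leading spaces (supports the space-skipping loops of both ports)
def cntSp : List Char → Nat
  | [] => 0
  | c :: r => if c = ' ' then cntSp r + 1 else 0

lemma cntSp_le (x : List Char) : cntSp x ≤ x.length := by
  induction x with
  | nil => simp [cntSp]
  | cons c r ih => simp only [cntSp]; split <;> simp; omega

-- `while j < len(f) and f[j] == " ": j += 1`  (shared helper of both ports)
def skipSp (f : List Char) (j : Nat) : Nat :=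
  if h : f[j]? = some ' ' then skipSp f (j + 1) else j
termination_by f.length - j
decreasing_by
  have := (List.getElem?_eq_some_iff.mp h).1
  omega

lemma skipSp_eq (f : List Char) (j : Nat) : skipSp f j = j + cntSp (f.drop j) := by
  by_cases h : f[j]? = some ' '
  · obtain ⟨hlt, hc⟩ := List.getElem?_eq_some_iff.mp h
    rw [skipSp.eq_def, dif_pos h, skipSp_eq f (j + 1)]
    rw [List.drop_eq_getElem_cons hlt]
    simp [cntSp, hc]
    omega
  · rw [skipSp.eq_def, dif_neg h]
    by_cases hlt : j < f.length
    · rw [List.drop_eq_getElem_cons hlt]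
      have : ¬ f[j] = ' ' := by
        intro hc; exact h (by rw [List.getElem?_eq_some_iff]; exact ⟨hlt, hc⟩)
      simp [cntSp, this]
    · rw [List.drop_eq_nil_of_le (by omega)]; simp [cntSp]
termination_by f.length - j
decreasing_by
  have := (List.getElem?_eq_some_iff.mp h).1
  omega

lemma skipSp_ge (f : List Char) (j : Nat) : j ≤ skipSp f j := by
  rw [skipSp_eq]; omega

lemma skipSp_le (f : List Char) (j : Nat) (h : j ≤ f.length) : skipSp f j ≤ f.length := by
  rw [skipSp_eq]
  have h1 := cntSp_le (f.drop j)
  simp at h1; omega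

-- ===== PORT A =====
-- one `for quantifier in quantifiers:` body of A: test the quantifier at i, possibly
-- rebuild the whole string with "(" inserted and ")" appended, returning (formula, i)
def stepQ (q : List Char) (f : List Char) (i : Nat) : List Char × Nat :=
  if (f.drop i).take q.length = q then        -- formula[i:i+len(quantifier)] == quantifier
    -- j := skipSp f (i + q.length) is the first space-skip; j2 := skipSp f (j + 1) the second
    if (f[skipSp f (i + q.length)]?.any PySem.Chars.isalpha) then   -- j < len(formula) and formula[j].isalpha() (len(formula[j:j+1])==1 is then automatic)
      if f[skipSp f (skipSp f (i + q.length) + 1)]? ≠ some '(' then -- j >= len(formula) or formula[j] != "("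
        -- formula[:j] + "(" + formula[j:] + ")" ; i = j + 1
        (f.take (skipSp f (skipSp f (i + q.length) + 1)) ++ '(' :: (f.drop (skipSp f (skipSp f (i + q.length) + 1)) ++ [')']),
         skipSp f (skipSp f (i + q.length) + 1) + 1)
      else (f, i)
    else (f, i)
  else (f, i)

lemma stepQ_measure (q f : List Char) (i : Nat) :
    i ≤ (stepQ q f i).2 ∧ (stepQ q f i).1.length - (stepQ q f i).2 ≤ f.length - i := by
  unfold stepQ
  split
  · split
    · split
      · rename_i hm ha hp
        have hj := skipSp_ge f (i + q.length)
        have hjlt : skipSp f (i + q.length) < f.length := by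
          cases hx : f[skipSp f (i + q.length)]? with
          | none => simp [hx] at ha
          | some c => exact (List.getElem?_eq_some_iff.mp hx).1
        have hj2 := skipSp_ge f (skipSp f (i + q.length) + 1)
        have hj2le := skipSp_le f (skipSp f (i + q.length) + 1) (by omega)
        constructor
        · simp; omega
        · simp; omega
      · simp
    · simp
  · simp

-- the `while i < len(formula):` loop of A; each iteration runs the "all" body then the "exists" body, then i += 1
def whileA (f : List Char) (i : Nat) : List Char :=
  if i < f.length then
    whileA (stepQ ['e','x','i','s','t','s'] (stepQ ['a','l','l'] f i).1 (stepQ ['a','l','l'] f i).2).1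
           ((stepQ ['e','x','i','s','t','s'] (stepQ ['a','l','l'] f i).1 (stepQ ['a','l','l'] f i).2).2 + 1)
  else f
termination_by f.length - i
decreasing_by
  have h1 := stepQ_measure ['a','l','l'] f i
  have h2 := stepQ_measure ['e','x','i','s','t','s'] (stepQ ['a','l','l'] f i).1 (stepQ ['a','l','l'] f i).2
  omega

def ensure_parentheses_after_quantifiers (formula : String) : String :=
  String.ofList (whileA formula.toList 0)

-- ===== PORT B =====
-- state (i, prev, out, closes): scan index, start of the not-yet-copied part, output buffer, pending close count
-- one `for quantifier in …:` body of B: same tests on the ORIGINAL string; on insertion copy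
-- the pending segment formula[prev:j] plus the opening paren to the buffer and bump the counter
def bStepQ (q orig : List Char) (s : Nat × Nat × List Char × Nat) : Nat × Nat × List Char × Nat :=
  if (orig.drop s.1).take q.length = q then   -- formula.startswith(quantifier, i)
    if (orig[skipSp orig (s.1 + q.length)]?.any PySem.Chars.isalpha) then
      if orig[skipSp orig (skipSp orig (s.1 + q.length) + 1)]? ≠ some '(' then
        (skipSp orig (skipSp orig (s.1 + q.length) + 1),
         skipSp orig (skipSp orig (s.1 + q.length) + 1),
         s.2.2.1 ++ (orig.drop s.2.1).take (skipSp orig (skipSp orig (s.1 + q.length) + 1) - s.2.1) ++ ['('],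
         s.2.2.2 + 1)
      else s
    else s
  else s

lemma bStepQ_le (q orig : List Char) (s : Nat × Nat × List Char × Nat) : s.1 ≤ (bStepQ q orig s).1 := by
  unfold bStepQ
  split
  · split
    · split
      · have := skipSp_ge orig (s.1 + q.length)
        have := skipSp_ge orig (skipSp orig (s.1 + q.length) + 1)
        simp; omega
      · simp
    · simp
  · simp

-- the `while i < n:` loop of B; at the end flush formula[prev:] and the pending closes
def bLoop (orig : List Char) (s : Nat × Nat × List Char × Nat) : List Char :=
  if s.1 < orig.length then
    bLoop orig ((bStepQ ['e','x','i','s','t','s'] orig (bStepQ ['a','l','l'] orig s)).1 + 1,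
                (bStepQ ['e','x','i','s','t','s'] orig (bStepQ ['a','l','l'] orig s)).2)
  else s.2.2.1 ++ orig.drop s.2.1 ++ List.replicate s.2.2.2 ')'
termination_by orig.length - s.1
decreasing_by
  have h1 := bStepQ_le ['a','l','l'] orig s
  have h2 := bStepQ_le ['e','x','i','s','t','s'] orig (bStepQ ['a','l','l'] orig s)
  omega

def ensure_parentheses_after_quantifiers_alt (formula : String) : String :=
  String.ofList (bLoop formula.toList (0, 0, [], 0))

-- ===== PRECONDITION & SPEC =====
def Spec_ensure_parentheses_after_quantifiers (formula : String) (out : String) : Prop := out = ensure_parentheses_after_quantifiers_alt formula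
instance (formula : String) (out : String) : Decidable (Spec_ensure_parentheses_after_quantifiers formula out) := by unfold Spec_ensure_parentheses_after_quantifiers; infer_instance

-- ===== CLAIM (what is proved, stated in full; the proofs are below) =====
def Claim_equal_ensure_parentheses_after_quantifiers : Prop := ∀ (formula : String), Dom_ensure_parentheses_after_quantifiers formula → Spec_ensure_parentheses_after_quantifiers formula (ensure_parentheses_after_quantifiers formula)

-- ===== LEMMAS AND PROOFS =====

lemma cntSp_append_zero (x y : List Char) (hy : cntSp y = 0) : cntSp (x ++ y) = cntSp x := by
  induction x with
  | nil => simpa using hy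
  | cons c r ih => simp only [cntSp, List.cons_append]; split <;> simp [ih]

lemma cntSp_rep (c : Nat) : cntSp (List.replicate c ')') = 0 := by
  cases c <;> simp [cntSp, List.replicate]

lemma dropMod (out S R : List Char) (t : Nat) :
    (out ++ S ++ R).drop (out.length + t) = (S ++ R).drop t := by
  rw [List.append_assoc]; exact List.drop_length_add_append t

lemma dropModFull (orig out : List Char) (prev k c : Nat) (hp : prev ≤ k) (hk : k ≤ orig.length) :
    (out ++ orig.drop prev ++ List.replicate c ')').drop (out.length + (k - prev)) =
      orig.drop k ++ List.replicate c ')' := by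
  rw [dropMod, List.drop_append_of_le_length (by simp; omega), List.drop_drop]
  congr 2; omega

lemma skipMod (orig out : List Char) (prev k c : Nat) (hp : prev ≤ k) (hk : k ≤ orig.length) :
    skipSp (out ++ orig.drop prev ++ List.replicate c ')') (out.length + (k - prev)) =
      out.length + (skipSp orig k - prev) := by
  rw [skipSp_eq, skipSp_eq, dropModFull orig out prev k c hp hk,
      cntSp_append_zero _ _ (cntSp_rep c)]
  omega

lemma getAt (orig out : List Char) (prev k c : Nat) (hp : prev ≤ k) (hk : k ≤ orig.length) :
    (out ++ orig.drop prev ++ List.replicate c ')')[out.length + (k - prev)]? =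
      (orig.drop k ++ List.replicate c ')')[0]? := by
  have h0 : out.length + (k - prev) = out.length + (k - prev) + 0 := by omega
  rw [h0, ← List.getElem?_drop, dropModFull orig out prev k c hp hk]

lemma takeIff (u : List Char) (c : Nat) (q : List Char) (hq : ')' ∉ q) :
    ((u ++ List.replicate c ')').take q.length = q) ↔ (u.take q.length = q) := by
  constructor
  · intro h
    by_cases hlen : q.length ≤ u.length
    · rwa [List.take_append_of_le_length hlen] at h
    · exfalso
      apply hq
      have hhd : q[u.length]? = (u ++ List.replicate c ')')[u.length]? := by
        rw [← h, List.getElem?_take_of_lt (by omega)]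
      have hc0 : c ≠ 0 := by
        rintro rfl
        have := congrArg List.length h
        simp at this
        omega
      have : q[u.length]? = some ')' := by
        rw [hhd, List.getElem?_append_right (by omega)]
        simp [List.getElem?_replicate]
        omega
      exact List.mem_of_getElem? this
  · intro h
    have hlen : q.length ≤ u.length := by
      have := congrArg List.length h
      simp at this
      omega
    rw [List.take_append_of_le_length hlen]; exact h

lemma stepQ_noop (q f : List Char) (k : Nat) (hq : ')' ∉ q) (hqne : q ≠ [])
    (hk : k < f.length) (hc : f[k] = ')') : stepQ q f k = (f, k) := by
  unfold stepQ
  rw [if_neg]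
  intro heq
  apply hq
  cases q with
  | nil => exact absurd rfl hqne
  | cons a t =>
    rw [List.drop_eq_getElem_cons hk, hc] at heq
    simp only [List.length_cons, List.take_succ_cons, List.cons.injEq] at heq
    rw [← heq.1]
    exact List.mem_cons_self

lemma whileA_tail (f : List Char) : ∀ (n k : Nat), f.length - k ≤ n →
    (∀ m (_ : m < f.length), k ≤ m → f[m] = ')') → whileA f k = f := by
  intro n
  induction n with
  | zero =>
    intro k h1 _
    rw [whileA, if_neg (by omega)]
  | succ n ih =>
    intro k h1 h2
    by_cases hk : k < f.length
    · rw [whileA, if_pos hk, stepQ_noop _ _ _ (by decide) (by decide) hk (h2 k hk le_rfl),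
          stepQ_noop _ _ _ (by decide) (by decide) hk (h2 k hk le_rfl)]
      exact ih (k + 1) (by omega) (fun m hm hkm => h2 m hm (by omega))
    · rw [whileA, if_neg hk]

lemma isalpha_rep_head (c : Nat) :
    Option.any PySem.Chars.isalpha (List.replicate c ')')[0]? = false := by
  cases c with
  | zero => simp
  | succ n => simp [List.replicate_succ]; decide

-- one `for`-body correspondence: A's stepQ on the modified string tracks B's bStepQ on the original
lemma step_corr (q orig out : List Char) (i prev c : Nat) (hq : ')' ∉ q)
    (hpi : prev ≤ i) (hio : i ≤ orig.length) :
    stepQ q (out ++ orig.drop prev ++ List.replicate c ')') (out.length + (i - prev)) =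
      ((bStepQ q orig (i, prev, out, c)).2.2.1 ++ orig.drop (bStepQ q orig (i, prev, out, c)).2.1 ++
         List.replicate (bStepQ q orig (i, prev, out, c)).2.2.2 ')',
       (bStepQ q orig (i, prev, out, c)).2.2.1.length +
         ((bStepQ q orig (i, prev, out, c)).1 - (bStepQ q orig (i, prev, out, c)).2.1)) ∧
    (bStepQ q orig (i, prev, out, c)).2.1 ≤ (bStepQ q orig (i, prev, out, c)).1 ∧
    (bStepQ q orig (i, prev, out, c)).1 ≤ orig.length ∧
    i ≤ (bStepQ q orig (i, prev, out, c)).1 := by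
  have hdrop_i : (out ++ orig.drop prev ++ List.replicate c ')').drop (out.length + (i - prev)) =
      orig.drop i ++ List.replicate c ')' := dropModFull orig out prev i c hpi hio
  unfold stepQ bStepQ
  dsimp only
  rw [hdrop_i]
  by_cases hm : (orig.drop i).take q.length = q
  · rw [if_pos ((takeIff _ c q hq).mpr hm), if_pos hm]
    have hql : i + q.length ≤ orig.length := by
      have := congrArg List.length hm
      simp at this
      omega
    have hjge := skipSp_ge orig (i + q.length)
    have hjle := skipSp_le orig (i + q.length) hql
    have hsk1 : skipSp (out ++ orig.drop prev ++ List.replicate c ')')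
        (out.length + (i - prev) + q.length) = out.length + (skipSp orig (i + q.length) - prev) := by
      rw [show out.length + (i - prev) + q.length = out.length + ((i + q.length) - prev) by omega,
          skipMod orig out prev (i + q.length) c (by omega) hql]
    rw [hsk1, getAt orig out prev (skipSp orig (i + q.length)) c (by omega) hjle]
    by_cases hjlt : skipSp orig (i + q.length) < orig.length
    · rw [List.drop_eq_getElem_cons hjlt, List.getElem?_eq_getElem hjlt]
      simp only [List.cons_append, List.getElem?_cons_zero, Option.any_some]
      by_cases ha : PySem.Chars.isalpha orig[skipSp orig (i + q.length)] = true
      · rw [if_pos ha, if_pos ha]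
        have hj2ge := skipSp_ge orig (skipSp orig (i + q.length) + 1)
        have hj2le := skipSp_le orig (skipSp orig (i + q.length) + 1) (by omega)
        have hsk2 : skipSp (out ++ orig.drop prev ++ List.replicate c ')')
            (out.length + (skipSp orig (i + q.length) - prev) + 1) =
            out.length + (skipSp orig (skipSp orig (i + q.length) + 1) - prev) := by
          rw [show out.length + (skipSp orig (i + q.length) - prev) + 1 =
              out.length + ((skipSp orig (i + q.length) + 1) - prev) by omega,
              skipMod orig out prev (skipSp orig (i + q.length) + 1) c (by omega) (by omega)]
        rw [hsk2, getAt orig out prev (skipSp orig (skipSp orig (i + q.length) + 1)) c (by omega) hj2le]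
        by_cases hpar : orig[skipSp orig (skipSp orig (i + q.length) + 1)]? = some '('
        · have hj2lt : skipSp orig (skipSp orig (i + q.length) + 1) < orig.length :=
            (List.getElem?_eq_some_iff.mp hpar).1
          rw [List.drop_eq_getElem_cons hj2lt]
          simp only [List.cons_append, List.getElem?_cons_zero]
          have hchar : orig[skipSp orig (skipSp orig (i + q.length) + 1)] = '(' := by
            have := List.getElem?_eq_some_iff.mp hpar
            exact this.2
          rw [if_neg (by simp [hchar]), if_neg (by simp [hpar])]
          exact ⟨rfl, hpi, hio, le_rfl⟩
        · have hAcond : (orig.drop (skipSp orig (skipSp orig (i + q.length) + 1)) ++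
              List.replicate c ')')[0]? ≠ some '(' := by
            by_cases hj2lt : skipSp orig (skipSp orig (i + q.length) + 1) < orig.length
            · rw [List.drop_eq_getElem_cons hj2lt]
              simp only [List.cons_append, List.getElem?_cons_zero]
              intro hcon
              apply hpar
              rw [List.getElem?_eq_getElem hj2lt]
              exact hcon
            · rw [List.drop_eq_nil_of_le (by omega)]
              simp only [List.nil_append, List.getElem?_replicate]
              split <;> simp
          rw [if_pos hAcond, if_pos hpar]
          refine ⟨?_, le_rfl, hj2le, by omega⟩
          have ht : skipSp orig (skipSp orig (i + q.length) + 1) - prev ≤ (orig.drop prev).length := by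
            simp; omega
          have htake : (out ++ orig.drop prev ++ List.replicate c ')').take
              (out.length + (skipSp orig (skipSp orig (i + q.length) + 1) - prev)) =
              out ++ (orig.drop prev).take (skipSp orig (skipSp orig (i + q.length) + 1) - prev) := by
            rw [List.append_assoc, List.take_length_add_append, List.take_append_of_le_length ht]
          have hdrop2 := dropModFull orig out prev (skipSp orig (skipSp orig (i + q.length) + 1)) c
            (by omega) hj2le
          rw [htake, hdrop2]
          simp only [Prod.mk.injEq]
          constructor
          · simp [List.append_assoc, List.replicate_succ']
          · simp only [List.length_append, List.length_take, List.length_cons]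
            simp
            omega
      · rw [if_neg ha, if_neg ha]
        exact ⟨rfl, hpi, hio, le_rfl⟩
    · have hjeq : skipSp orig (i + q.length) = orig.length := by omega
      rw [List.drop_eq_nil_of_le (by omega), List.nil_append, isalpha_rep_head,
          if_neg (by simp), if_neg (by rw [List.getElem?_eq_none (by omega)]; simp)]
      exact ⟨rfl, hpi, hio, le_rfl⟩
  · rw [if_neg (fun hcon => hm ((takeIff _ c q hq).mp hcon)), if_neg hm]
    exact ⟨rfl, hpi, hio, le_rfl⟩

lemma sim_base (orig : List Char) (i prev c : Nat) (out : List Char)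
    (hi : orig.length ≤ i) (h2 : prev ≤ i) (h3 : prev ≤ orig.length) :
    whileA (out ++ orig.drop prev ++ List.replicate c ')') (out.length + (i - prev)) =
      bLoop orig (i, prev, out, c) := by
  rw [bLoop]
  dsimp only
  rw [if_neg (by omega)]
  apply whileA_tail _ ((out ++ orig.drop prev ++ List.replicate c ')').length) _ (by omega)
  intro m hm hkm
  have hlen : (out ++ orig.drop prev).length = out.length + (orig.length - prev) := by simp
  have hmge : (out ++ orig.drop prev).length ≤ m := by omega
  have hget : (out ++ orig.drop prev ++ List.replicate c ')')[m]? = some ')' := by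
    rw [List.getElem?_append_right hmge, List.getElem?_replicate]
    have hmlt : m < (out ++ orig.drop prev ++ List.replicate c ')').length := hm
    simp only [List.length_append, List.length_drop, List.length_replicate] at hmlt
    rw [if_pos (by omega)]
  obtain ⟨_, hres⟩ := List.getElem?_eq_some_iff.mp hget
  exact hres

-- the big simulation lemma: A running on  out ++ orig.drop prev ++ replicate closes  at modified index
-- out.length + (i - prev)  computes what B computes from state (i, prev, out, closes)
lemma main_sim : ∀ (n : Nat) (orig : List Char) (i prev closes : Nat) (out : List Char),
    orig.length - i ≤ n → prev ≤ i → prev ≤ orig.length →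
    whileA (out ++ orig.drop prev ++ List.replicate closes ')') (out.length + (i - prev)) =
      bLoop orig (i, prev, out, closes) := by
  intro n
  induction n with
  | zero =>
    intro orig i prev c out h1 h2 h3
    exact sim_base orig i prev c out (by omega) h2 h3
  | succ n ih =>
    intro orig i prev c out h1 h2 h3
    by_cases hi : i < orig.length
    · rw [whileA, if_pos (by simp; omega), bLoop, if_pos hi]
      have S1 := step_corr ['a','l','l'] orig out i prev c (by decide) h2 (le_of_lt hi)
      have hEta1 : ((bStepQ ['a','l','l'] orig (i, prev, out, c)).1,
          (bStepQ ['a','l','l'] orig (i, prev, out, c)).2.1,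
          (bStepQ ['a','l','l'] orig (i, prev, out, c)).2.2.1,
          (bStepQ ['a','l','l'] orig (i, prev, out, c)).2.2.2) =
          bStepQ ['a','l','l'] orig (i, prev, out, c) := rfl
      have S2 := step_corr ['e','x','i','s','t','s'] orig
          (bStepQ ['a','l','l'] orig (i, prev, out, c)).2.2.1
          (bStepQ ['a','l','l'] orig (i, prev, out, c)).1
          (bStepQ ['a','l','l'] orig (i, prev, out, c)).2.1
          (bStepQ ['a','l','l'] orig (i, prev, out, c)).2.2.2
          (by decide) S1.2.1 S1.2.2.1
      rw [hEta1] at S2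
      rw [S1.1, S2.1]
      have hEta2 : ((bStepQ ['e','x','i','s','t','s'] orig (bStepQ ['a','l','l'] orig (i, prev, out, c))).1 + 1,
          (bStepQ ['e','x','i','s','t','s'] orig (bStepQ ['a','l','l'] orig (i, prev, out, c))).2) =
          ((bStepQ ['e','x','i','s','t','s'] orig (bStepQ ['a','l','l'] orig (i, prev, out, c))).1 + 1,
          (bStepQ ['e','x','i','s','t','s'] orig (bStepQ ['a','l','l'] orig (i, prev, out, c))).2.1,
          (bStepQ ['e','x','i','s','t','s'] orig (bStepQ ['a','l','l'] orig (i, prev, out, c))).2.2.1,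
          (bStepQ ['e','x','i','s','t','s'] orig (bStepQ ['a','l','l'] orig (i, prev, out, c))).2.2.2) := rfl
      rw [hEta2]
      have hidx : (bStepQ ['e','x','i','s','t','s'] orig (bStepQ ['a','l','l'] orig (i, prev, out, c))).2.2.1.length +
          ((bStepQ ['e','x','i','s','t','s'] orig (bStepQ ['a','l','l'] orig (i, prev, out, c))).1 -
           (bStepQ ['e','x','i','s','t','s'] orig (bStepQ ['a','l','l'] orig (i, prev, out, c))).2.1) + 1 =
          (bStepQ ['e','x','i','s','t','s'] orig (bStepQ ['a','l','l'] orig (i, prev, out, c))).2.2.1.length +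
          (((bStepQ ['e','x','i','s','t','s'] orig (bStepQ ['a','l','l'] orig (i, prev, out, c))).1 + 1) -
           (bStepQ ['e','x','i','s','t','s'] orig (bStepQ ['a','l','l'] orig (i, prev, out, c))).2.1) := by
        have := S2.2.1
        omega
      rw [hidx]
      apply ih
      · have h4 := S1.2.2.2
        have h5 := S2.2.2.2
        omega
      · have := S2.2.1
        omega
      · have h4 := S2.2.1
        have h5 := S2.2.2.1
        omega
    · exact sim_base orig i prev c out (by omega) h2 h3

-- ===== VERDICT (by name: the statement is the Claim_ definition above) =====
theorem ensure_parentheses_after_quantifiers_spec : Claim_equal_ensure_parentheses_after_quantifiers := by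
  intro formula _
  unfold Spec_ensure_parentheses_after_quantifiers
  unfold ensure_parentheses_after_quantifiers ensure_parentheses_after_quantifiers_alt
  have := main_sim (formula.toList.length) formula.toList 0 0 0 [] (by omega) (by omega) (by omega)
  simp at this
  rw [this]
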